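-- pv_equiv track=rewrite | github.com/VitorSVNascimento/TSI-Webservices | Aula-3-Analise-JSON/analyze_library.py | book_with_longest_title
-- ===== SOURCE A (Python) =====
-- def book_with_longest_title(all_books):
--     if not all_books:
--         return 'Nenhum livro encontrado.'
--
--     max_title_length = max(len(book.get('titulo', '')) for book in all_books)
--     longest_title_books = [book for book in all_books if len(book.get('titulo', '')) == max_title_length]
--
--     if not longest_title_books:
--         return 'Nenhum livro encontrado.'
--     elif len(longest_title_books) == 1:
--         return longest_title_books[0].get('titulo', 'Título Desconhecido')
--     else:
--         return ', '.join(book.get('titulo', 'Título Desconhecido') for book in longest_title_books)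
-- ===== SOURCE B (Python) =====
-- def book_with_longest_title(all_books):
--     if not all_books:
--         return 'Nenhum livro encontrado.'
--     best = -1
--     titles = []
--     for book in all_books:
--         n = len(book.get('titulo', ''))
--         if n > best:
--             best = n
--             titles = [book.get('titulo', 'Título Desconhecido')]
--         elif n == best:
--             titles.append(book.get('titulo', 'Título Desconhecido'))
--     return titles[0] if len(titles) == 1 else ', '.join(titles)
-- ===== Notes on version B (the rewrite author's own statement) =====
-- stated objective: alternative
-- what changed: Replaced A's two-pass max-then-filter structure by a single fold that maintains the running best title length and the list of display titles, resetting on a strictly longer title and appending on a tie.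
import Mathlib
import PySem

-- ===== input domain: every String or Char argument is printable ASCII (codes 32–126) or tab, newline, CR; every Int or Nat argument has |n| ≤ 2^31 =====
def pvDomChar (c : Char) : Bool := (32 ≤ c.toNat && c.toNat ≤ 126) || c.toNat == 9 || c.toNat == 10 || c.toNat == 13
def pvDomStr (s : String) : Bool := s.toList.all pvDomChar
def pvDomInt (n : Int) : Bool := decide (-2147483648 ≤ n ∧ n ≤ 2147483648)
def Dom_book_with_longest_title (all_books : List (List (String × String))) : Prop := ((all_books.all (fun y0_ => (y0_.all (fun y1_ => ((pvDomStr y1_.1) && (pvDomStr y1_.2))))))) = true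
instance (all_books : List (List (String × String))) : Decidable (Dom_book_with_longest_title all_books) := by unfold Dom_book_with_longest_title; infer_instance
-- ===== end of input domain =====

-- B replaces A's two-pass max-then-filter by ONE fold keeping the running best length and
-- the tied display titles (alternative decomposition, same O(n) cost).

-- ===== PORT A =====
-- len(book.get('titulo','')) and book.get('titulo','Título Desconhecido')
def pvTLenA (book : List (String × String)) : Int :=
  PySem.Str.len ((PySem.Dict.mk book).getD "titulo" "")
def pvTDispA (book : List (String × String)) : String :=
  (PySem.Dict.mk book).getD "titulo" "Título Desconhecido"
def book_with_longest_title (all_books : List (List (String × String))) : String :=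
  match all_books with
  | [] => "Nenhum livro encontrado."
  | b :: rest =>
    -- max(len(book.get('titulo','')) for book in all_books)
    let maxLen : Int := rest.foldl (fun m bk => max m (pvTLenA bk)) (pvTLenA b)
    -- [book for book in all_books if len(book.get('titulo','')) == max_title_length]
    let longest := (b :: rest).filter (fun bk => pvTLenA bk == maxLen)
    match longest with
    | [] => "Nenhum livro encontrado."
    | [x] => pvTDispA x
    | l => PySem.Str.join ", " (l.map pvTDispA)

-- ===== PORT B =====
def pvTLenB (book : List (String × String)) : Int :=
  PySem.Str.len ((PySem.Dict.mk book).getD "titulo" "")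
def pvTDispB (book : List (String × String)) : String :=
  (PySem.Dict.mk book).getD "titulo" "Título Desconhecido"

def pvStepB (s : Int × List String) (bk : List (String × String)) : Int × List String :=
  let n := pvTLenB bk
  if n > s.1 then (n, [pvTDispB bk])
  else if n == s.1 then (s.1, s.2 ++ [pvTDispB bk])
  else s

def book_with_longest_title_alt (all_books : List (List (String × String))) : String :=
  if all_books.isEmpty then "Nenhum livro encontrado."
  else
    let r := all_books.foldl pvStepB (-1, [])
    -- titles[0] if len(titles) == 1 else ', '.join(titles)
    if r.2.length = 1 then PySem.List.pyGetD r.2 0 "" else PySem.Str.join ", " r.2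

-- ===== PRECONDITION & SPEC =====
def Spec_book_with_longest_title (all_books : List (List (String × String))) (out : String) : Prop := out = book_with_longest_title_alt all_books
instance (all_books : List (List (String × String))) (out : String) : Decidable (Spec_book_with_longest_title all_books out) := by unfold Spec_book_with_longest_title; infer_instance

-- ===== CLAIM (what is proved, stated in full; the proofs are below) =====
def Claim_equal_book_with_longest_title : Prop := ∀ (all_books : List (List (String × String))), Dom_book_with_longest_title all_books → Spec_book_with_longest_title all_books (book_with_longest_title all_books)

-- ===== LEMMAS AND PROOFS =====

lemma pvTLenA_eq : pvTLenA = pvTLenB := rfl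
lemma pvTDispA_eq : pvTDispA = pvTDispB := rfl

-- running max of title lengths over l starting from m
def pvM (l : List (List (String × String))) (m : Int) : Int :=
  l.foldl (fun a b => max a (pvTLenB b)) m

lemma pvM_nil (m : Int) : pvM [] m = m := rfl

lemma pvM_cons (b : List (String × String)) (l : List (List (String × String))) (m : Int) :
    pvM (b :: l) m = pvM l (max m (pvTLenB b)) := rfl

lemma pvM_le (l : List (List (String × String))) (m : Int) : m ≤ pvM l m := by
  induction l generalizing m with
  | nil => exact le_refl m
  | cons b t ih => exact le_trans (le_max_left _ _) (ih (max m (pvTLenB b)))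

lemma pvM_attained (l : List (List (String × String))) (m : Int) :
    pvM l m = m ∨ ∃ x ∈ l, pvTLenB x = pvM l m := by
  induction l generalizing m with
  | nil => exact Or.inl rfl
  | cons b t ih =>
    rw [pvM_cons]
    rcases ih (max m (pvTLenB b)) with h | ⟨x, hx, hlen⟩
    · rw [h]
      rcases max_choice m (pvTLenB b) with h' | h'
      · exact Or.inl h'
      · exact Or.inr ⟨b, List.mem_cons_self, h'.symm⟩
    · exact Or.inr ⟨x, List.mem_cons_of_mem _ hx, hlen⟩

lemma pvTLenB_nonneg (b : List (String × String)) : 0 ≤ pvTLenB b := by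
  simp [pvTLenB, PySem.Str.len_eq]

-- the single-pass fold computes (running max, display titles of the books attaining it)
lemma pvFoldB_char (l : List (List (String × String))) (m : Int) (ts : List String) :
    l.foldl pvStepB (m, ts) =
      (pvM l m,
       (if pvM l m = m then ts else []) ++
         ((l.filter (fun b => pvTLenB b == pvM l m)).map pvTDispB)) := by
  induction l generalizing m ts with
  | nil => simp [pvM_nil]
  | cons b t ih =>
    rw [List.foldl_cons, pvM_cons]
    by_cases hgt : pvTLenB b > m
    · have hstep : pvStepB (m, ts) b = (pvTLenB b, [pvTDispB b]) := by
        simp [pvStepB, hgt]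
      have hmax : max m (pvTLenB b) = pvTLenB b := max_eq_right (le_of_lt hgt)
      rw [hstep, ih, hmax]
      have hMne : pvM t (pvTLenB b) ≠ m := by
        have := pvM_le t (pvTLenB b); omega
      rw [if_neg hMne]
      by_cases hbM : pvM t (pvTLenB b) = pvTLenB b
      · rw [if_pos hbM, List.filter_cons_of_pos (by rw [hbM]; simp)]
        simp
      · rw [if_neg hbM, List.filter_cons_of_neg (by simp; exact fun h => hbM h.symm)]
    · have hmax : max m (pvTLenB b) = m := max_eq_left (by omega)
      rw [hmax]
      by_cases heq : pvTLenB b = m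
      · have hstep : pvStepB (m, ts) b = (m, ts ++ [pvTDispB b]) := by
          simp [pvStepB, heq]
        rw [hstep, ih]
        by_cases hMm : pvM t m = m
        · rw [if_pos hMm, if_pos hMm,
            List.filter_cons_of_pos (by simp [heq, hMm])]
          simp
        · rw [if_neg hMm, if_neg hMm,
            List.filter_cons_of_neg (by simp [heq]; exact fun h => hMm h.symm)]
      · have hstep : pvStepB (m, ts) b = (m, ts) := by
          simp [pvStepB, hgt, heq]
        rw [hstep, ih]
        have hbM : ¬ pvTLenB b = pvM t m := by
          have := pvM_le t m; omega
        rw [List.filter_cons_of_neg (by simp [hbM])]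

lemma pvM_neg_one (b : List (String × String)) (l : List (List (String × String))) :
    pvM (b :: l) (-1) = pvM l (pvTLenB b) := by
  rw [pvM_cons, max_eq_right]
  have := pvTLenB_nonneg b; omega

-- ===== VERDICT (by name: the statement is the Claim_ definition above) =====
theorem book_with_longest_title_spec : Claim_equal_book_with_longest_title := by
  intro all_books _
  unfold Spec_book_with_longest_title book_with_longest_title book_with_longest_title_alt
  simp only [pvTLenA_eq, pvTDispA_eq]
  match all_books with
  | [] => rfl
  | b :: rest =>
    simp only [List.isEmpty_cons, Bool.false_eq_true, if_false]
    rw [pvFoldB_char]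
    have hM : pvM (b :: rest) (-1) = rest.foldl (fun m bk => max m (pvTLenB bk)) (pvTLenB b) := by
      rw [pvM_neg_one]; rfl
    have hMne : pvM (b :: rest) (-1) ≠ -1 := by
      have h1 := pvTLenB_nonneg b
      have h2 : pvTLenB b ≤ pvM (b :: rest) (-1) := by
        rw [pvM_neg_one]; exact pvM_le _ _
      omega
    rw [if_neg hMne]
    simp only [List.nil_append]
    set M := pvM (b :: rest) (-1) with hMdef
    rw [← hM]
    have hne : (b :: rest).filter (fun bk => pvTLenB bk == M) ≠ [] := by
      rcases pvM_attained (b :: rest) (-1) with h | ⟨x, hx, hlen⟩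
      · exact absurd h.symm (Ne.symm hMne)
      · intro hnil
        have : x ∈ (b :: rest).filter (fun bk => pvTLenB bk == M) :=
          List.mem_filter.mpr ⟨hx, by rw [hlen, ← hMdef]; simp⟩
        rw [hnil] at this; exact absurd this (List.not_mem_nil)
    match hfe : (b :: rest).filter (fun bk => pvTLenB bk == M) with
    | [] => exact absurd hfe hne
    | [x] => simp
    | x :: y :: l => simp
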